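-- pv_equiv track=rewrite | github.com/xyver/county-map | data_converters/utilities/geometry_locator.py | get_dfs_country_order
-- ===== SOURCE A (Python) =====
-- from typing import Optional, Dict, List, Tuple, Any
--
-- def get_dfs_country_order(
--     countries_with_fires: List[str],
--     fire_counts: Dict[str, int],
--     adjacency: Dict[str, List[str]]
-- ) -> List[str]:
--     """
--     Get DFS traversal order for countries, starting with biggest.
--
--     Strategy:
--     1. Start with country that has most fires
--     2. DFS to neighbors (prioritizing neighbors with more fires)
--     3. When branch exhausted, pop to next biggest unvisited country
--     4. Repeat until all countries visited
--
--     This keeps neighboring countries processed together, so their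
--     geometries stay cached for cross-border fire checks.
--
--     Args:
--         countries_with_fires: List of country codes that have fires
--         fire_counts: Dict of iso3 -> fire count
--         adjacency: Dict of iso3 -> list of neighboring iso3
--
--     Returns:
--         Ordered list of country codes for processing
--     """
--     # Filter to only countries with fires
--     countries_set = set(countries_with_fires)
--     visited = set()
--     order = []
--
--     # Sort by fire count descending for picking start points
--     sorted_by_fires = sorted(
--         [c for c in countries_with_fires if c is not None],
--         key=lambda x: fire_counts.get(x, 0),
--         reverse=True
--     )
--
--     def dfs(iso3):
--         if iso3 in visited or iso3 not in countries_set: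
--             return
--         visited.add(iso3)
--         order.append(iso3)
--
--         # Get neighbors that have fires, sorted by fire count (biggest first)
--         neighbors = adjacency.get(iso3, [])
--         neighbors_with_fires = [n for n in neighbors if n in countries_set and n not in visited]
--         neighbors_with_fires.sort(key=lambda x: fire_counts.get(x, 0), reverse=True)
--
--         for neighbor in neighbors_with_fires:
--             dfs(neighbor)
--
--     # Start DFS from each unvisited country (biggest first)
--     for start_country in sorted_by_fires:
--         if start_country not in visited:
--             dfs(start_country)
--
--     # Add None/ocean fires at the end if present
--     if None in countries_set:
--         order.append(None)
--
--     return order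
-- ===== SOURCE B (Python) =====
-- def get_dfs_country_order(countries_with_fires, fire_counts, adjacency):
--     """Precompute fire-sorted neighbor lists once, then run one explicit node stack
--     (stale entries skipped when popped) instead of A's recursive DFS with per-visit
--     filtering and sorting."""
--     cset = set(countries_with_fires)
--
--     def fires(x):
--         return fire_counts.get(x, 0)
--
--     # one up-front pass: each country's fire-bearing neighbors, fire count descending
--     nbr = {c: sorted((m for m in ms if m in cset), key=fires, reverse=True)
--            for c, ms in adjacency.items()}
--
--     stack = sorted((c for c in countries_with_fires if c is not None),
--                    key=fires, reverse=True)
--     stack.reverse()  # so the biggest start is popped first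
--     visited = set()
--     order = []
--     while stack:
--         n = stack.pop()
--         if n in visited or n not in cset:
--             continue
--         visited.add(n)
--         order.append(n)
--         # push the whole presorted list; entries already visited are skipped at pop
--         stack.extend(reversed(nbr.get(n, [])))
--     if None in cset:
--         order.append(None)
--     return order
-- ===== Notes on version B (the rewrite author's own statement) =====
-- stated objective: alternative
-- what changed: A's recursive DFS, which filters and sorts each node's neighbor list at visit time inside the recursion, is replaced by one up-front pass building a dict of fire-sorted neighbor lists per country plus a single explicit node-stack loop that skips stale (already-visited) entries at pop time, eliminating both the recursion and the per-visit filter+sort.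
import Mathlib
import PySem

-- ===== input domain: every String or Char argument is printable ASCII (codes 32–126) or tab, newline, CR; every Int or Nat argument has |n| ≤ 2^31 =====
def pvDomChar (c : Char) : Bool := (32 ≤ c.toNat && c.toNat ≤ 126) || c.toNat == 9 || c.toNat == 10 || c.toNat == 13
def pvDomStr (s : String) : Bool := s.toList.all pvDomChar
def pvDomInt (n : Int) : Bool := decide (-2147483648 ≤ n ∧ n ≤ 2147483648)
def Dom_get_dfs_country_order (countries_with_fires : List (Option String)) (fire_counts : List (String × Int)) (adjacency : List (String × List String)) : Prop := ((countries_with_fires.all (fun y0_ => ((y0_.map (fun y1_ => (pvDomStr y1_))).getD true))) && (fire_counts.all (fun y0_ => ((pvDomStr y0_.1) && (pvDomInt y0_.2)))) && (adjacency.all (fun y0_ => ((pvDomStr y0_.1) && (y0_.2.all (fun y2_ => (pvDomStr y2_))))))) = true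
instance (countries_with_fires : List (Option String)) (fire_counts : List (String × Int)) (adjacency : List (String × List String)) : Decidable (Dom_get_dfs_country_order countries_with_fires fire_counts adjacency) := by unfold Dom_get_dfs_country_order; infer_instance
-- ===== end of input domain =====

-- B replaces A's recursive DFS (which filters and sorts each node's neighbors at visit
-- time) by one up-front pass building a dict of fire-sorted neighbor lists plus a plain
-- node stack whose stale entries are skipped at pop; objective: alternative (no speed claim).

-- ===== PORT A =====
-- [n for n in adjacency.get(iso3, []) if n in countries_set and n not in visited],
-- then .sort(key=lambda x: fire_counts.get(x, 0), reverse=True)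
def pvNbrs (cset : PySem.Set (Option String)) (fire_counts : List (String × Int))
    (adjacency : List (String × List String)) (visited : PySem.Set String) (iso3 : String) :
    List String :=
  PySem.List.sorted
    ((PySem.Dict.getD (PySem.Dict.mk adjacency) iso3 []).filter
      (fun n => PySem.Set.contains cset (some n) && !PySem.Set.contains visited n))
    (fun x => PySem.Dict.getD (PySem.Dict.mk fire_counts) x 0) true

-- sorted([c for c in countries_with_fires if c is not None], key=…, reverse=True)
def pvStarts (countries_with_fires : List (Option String)) (fire_counts : List (String × Int)) :
    List String :=
  PySem.List.sorted (countries_with_fires.filterMap (fun c => c))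
    (fun x => PySem.Dict.getD (PySem.Dict.mk fire_counts) x 0) true

-- A's recursive dfs; the fuel argument is ONLY a totality guard (never exhausted when
-- fuel ≥ number of unvisited countries, which the top-level call guarantees).
def pvDfsA (cset : PySem.Set (Option String)) (fire_counts : List (String × Int))
    (adjacency : List (String × List String)) :
    Nat → String → PySem.Set String × List (Option String) → PySem.Set String × List (Option String)
  | 0, _, st => st
  | Nat.succ f, iso3, st =>
    if PySem.Set.contains st.1 iso3 || !PySem.Set.contains cset (some iso3) then st
    else
      let v' := PySem.Set.add st.1 iso3
      let o' := st.2 ++ [some iso3]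
      (pvNbrs cset fire_counts adjacency v' iso3).foldl
        (fun st2 n => pvDfsA cset fire_counts adjacency f n st2) (v', o')

def get_dfs_country_order (countries_with_fires : List (Option String)) (fire_counts : List (String × Int)) (adjacency : List (String × List String)) : List (Option String) :=
  let cset := PySem.Set.ofList countries_with_fires
  let starts := pvStarts countries_with_fires fire_counts
  -- for start_country in sorted_by_fires: if start_country not in visited: dfs(start_country)
  let st := starts.foldl
    (fun st c =>
      if PySem.Set.contains st.1 c then st
      else pvDfsA cset fire_counts adjacency countries_with_fires.length c st)
    (PySem.Set.empty, [])
  st.2 ++ (if PySem.Set.contains cset none then ([none] : List (Option String)) else [])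

-- ===== PORT B =====
-- nbr = {c: sorted((m for m in ms if m in cset), key=fires, reverse=True)
--        for c, ms in adjacency.items()}
def pvSAdj (cset : PySem.Set (Option String)) (fire_counts : List (String × Int))
    (adjacency : List (String × List String)) : PySem.Dict String (List String) :=
  PySem.Dict.mk (adjacency.map (fun p =>
    (p.1, PySem.List.sorted (p.2.filter (fun m => PySem.Set.contains cset (some m)))
      (fun x => PySem.Dict.getD (PySem.Dict.mk fire_counts) x 0) true)))

-- the while loop over the explicit node stack (head of the list = top of the stack:
-- Python pops from the end of the reversed start list and extends with reversed(nbr),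
-- which is 'nbr_n ++ stack' here); fuel is ONLY a totality guard, spent on visits alone.
def pvLoopB (cset : PySem.Set (Option String)) (sadj : PySem.Dict String (List String)) :
    Nat → List String → PySem.Set String × List (Option String) → PySem.Set String × List (Option String)
  | _, [], st => st
  | f, n :: stack, st =>
    if PySem.Set.contains st.1 n || !PySem.Set.contains cset (some n) then
      pvLoopB cset sadj f stack st
    else
      match f with
      | 0 => st
      | Nat.succ f' =>
        pvLoopB cset sadj f' (PySem.Dict.getD sadj n [] ++ stack)
          (PySem.Set.add st.1 n, st.2 ++ [some n])
  termination_by f stack _ => (f, stack.length)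
  decreasing_by
  · apply Prod.Lex.right; simp
  · apply Prod.Lex.left; omega

def get_dfs_country_order_alt (countries_with_fires : List (Option String)) (fire_counts : List (String × Int)) (adjacency : List (String × List String)) : List (Option String) :=
  let cset := PySem.Set.ofList countries_with_fires
  let nbr := pvSAdj cset fire_counts adjacency
  let stack := PySem.List.sorted (countries_with_fires.filterMap (fun c => c))
    (fun x => PySem.Dict.getD (PySem.Dict.mk fire_counts) x 0) true
  let st := pvLoopB cset nbr countries_with_fires.length stack (PySem.Set.empty, [])
  st.2 ++ (if PySem.Set.contains cset none then [none] else [])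

-- ===== PRECONDITION & SPEC =====
def Spec_get_dfs_country_order (countries_with_fires : List (Option String)) (fire_counts : List (String × Int)) (adjacency : List (String × List String)) (out : List (Option String)) : Prop := out = get_dfs_country_order_alt countries_with_fires fire_counts adjacency
instance (countries_with_fires : List (Option String)) (fire_counts : List (String × Int)) (adjacency : List (String × List String)) (out : List (Option String)) : Decidable (Spec_get_dfs_country_order countries_with_fires fire_counts adjacency out) := by unfold Spec_get_dfs_country_order; infer_instance

-- ===== CLAIM (what is proved, stated in full; the proofs are below) =====
def Claim_equal_get_dfs_country_order : Prop := ∀ (countries_with_fires : List (Option String)) (fire_counts : List (String × Int)) (adjacency : List (String × List String)), Dom_get_dfs_country_order countries_with_fires fire_counts adjacency → Spec_get_dfs_country_order countries_with_fires fire_counts adjacency (get_dfs_country_order countries_with_fires fire_counts adjacency)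

-- ===== LEMMAS AND PROOFS =====

-- proof-side intermediate loop: B's stack loop but recomputing the visited-filtered,
-- sorted neighbor list at each visit (the shape closest to A's recursion)
def pvLoopI (cset : PySem.Set (Option String)) (fire_counts : List (String × Int))
    (adjacency : List (String × List String)) :
    Nat → List String → PySem.Set String × List (Option String) → PySem.Set String × List (Option String)
  | _, [], st => st
  | f, n :: stack, st =>
    if PySem.Set.contains st.1 n || !PySem.Set.contains cset (some n) then
      pvLoopI cset fire_counts adjacency f stack st
    else
      match f with
      | 0 => st
      | Nat.succ f' =>
        let v' := PySem.Set.add st.1 n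
        pvLoopI cset fire_counts adjacency f' (pvNbrs cset fire_counts adjacency v' n ++ stack)
          (v', st.2 ++ [some n])
  termination_by f stack _ => (f, stack.length)
  decreasing_by
  · apply Prod.Lex.right; simp
  · apply Prod.Lex.left; omega

-- strict version of List.monotone_filter_right's length consequence
theorem pvFilterLt {α : Type} (p q : α → Bool) (h : ∀ a, p a = true → q a = true) :
    ∀ (l : List α) (a : α), a ∈ l → p a = false → q a = true →
    (l.filter p).length < (l.filter q).length := by
  intro l
  induction l with
  | nil => intro a ha; simp at ha
  | cons b t ih =>
    intro a ha hpa hqa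
    rcases List.mem_cons.mp ha with rfl | ha
    · simp [hpa, hqa]
      exact List.Sublist.length_le (List.monotone_filter_right t h)
    · by_cases hb : p b = true
      · simp [hb, h b hb]
        exact ih a ha hpa hqa
      · simp at hb
        have := ih a ha hpa hqa
        by_cases hqb : q b = true <;> simp [hb, hqb] <;> omega

theorem pvNotMem {v : PySem.Set String} {n : String}
    (h : PySem.Set.contains v n = false) : n ∉ v := by
  intro hm
  rw [(PySem.Set.contains_iff v n).mpr hm] at h
  cases h

-- number of not-yet-visited countries (the real fuel bound)
def pvMu (cset : PySem.Set (Option String)) (v : PySem.Set String) : Nat :=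
  (cset.filter (fun c => match c with
    | none => false
    | some s => !PySem.Set.contains v s)).length

theorem pvMu_le (cset : PySem.Set (Option String)) (v : PySem.Set String) :
    pvMu cset v ≤ cset.length := by
  exact List.length_filter_le _ _

theorem pvMu_anti (cset : PySem.Set (Option String)) (v w : PySem.Set String)
    (h : ∀ x, PySem.Set.contains v x = true → PySem.Set.contains w x = true) :
    pvMu cset w ≤ pvMu cset v := by
  apply List.Sublist.length_le
  apply List.monotone_filter_right
  intro c hc
  cases c with
  | none => simp at hc
  | some s =>
    simp only [Bool.not_eq_eq_eq_not, Bool.not_true] at hc ⊢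
    cases hv : PySem.Set.contains v s with
    | false => rfl
    | true => rw [h s hv] at hc; exact hc

theorem pvMu_pos (cset : PySem.Set (Option String)) (v : PySem.Set String) (n : String)
    (hc : PySem.Set.contains cset (some n) = true)
    (hv : PySem.Set.contains v n = false) : 1 ≤ pvMu cset v := by
  have hm : some n ∈ cset := (PySem.Set.contains_iff _ _).mp hc
  have : some n ∈ cset.filter (fun c => match c with
      | none => false
      | some s => !PySem.Set.contains v s) := by
    apply List.mem_filter.mpr
    exact ⟨hm, by simp [pvNotMem hv]⟩
  exact List.length_pos_of_mem this

theorem pvContains_add_of (v : PySem.Set String) (n x : String)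
    (h : PySem.Set.contains v x = true) :
    PySem.Set.contains (PySem.Set.add v n) x = true := by
  rw [PySem.Set.contains_iff]
  exact (PySem.Set.mem_add v n x).mpr (Or.inl ((PySem.Set.contains_iff _ _).mp h))

theorem pvMu_add_lt (cset : PySem.Set (Option String)) (v : PySem.Set String) (n : String)
    (hc : PySem.Set.contains cset (some n) = true)
    (hv : PySem.Set.contains v n = false) :
    pvMu cset (PySem.Set.add v n) < pvMu cset v := by
  apply pvFilterLt _ _ ?mono cset (some n) ((PySem.Set.contains_iff _ _).mp hc)
    (by simp) (by simp [pvNotMem hv])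
  case mono =>
    intro c hc'
    cases c with
    | none => simp at hc'
    | some s =>
      simp only [Bool.not_eq_eq_eq_not, Bool.not_true] at hc' ⊢
      cases hs : PySem.Set.contains v s with
      | false => rfl
      | true => rw [pvContains_add_of v n s hs] at hc'; exact hc'

theorem pvDfsA_of_skip (cset : PySem.Set (Option String)) (fc : List (String × Int))
    (adj : List (String × List String)) (f : Nat) (n : String)
    (st : PySem.Set String × List (Option String))
    (h : (PySem.Set.contains st.1 n || !PySem.Set.contains cset (some n)) = true) :
    pvDfsA cset fc adj f n st = st := by
  cases f with
  | zero => rfl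
  | succ f => rw [pvDfsA, if_pos h]

theorem pvDfsA_of_contains (cset : PySem.Set (Option String)) (fc : List (String × Int))
    (adj : List (String × List String)) (f : Nat) (n : String)
    (st : PySem.Set String × List (Option String))
    (h : PySem.Set.contains st.1 n = true) :
    pvDfsA cset fc adj f n st = st :=
  pvDfsA_of_skip cset fc adj f n st (by rw [h, Bool.true_or])

theorem pvDfsA_mono (cset : PySem.Set (Option String)) (fc : List (String × Int))
    (adj : List (String × List String)) (f : Nat) :
    ∀ (n : String) (st : PySem.Set String × List (Option String)) (x : String),
    PySem.Set.contains st.1 x = true →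
    PySem.Set.contains (pvDfsA cset fc adj f n st).1 x = true := by
  induction f with
  | zero => intro n st x h; exact h
  | succ f ih =>
    intro n st x h
    rw [pvDfsA]
    split
    · exact h
    · have hfold : ∀ (ns : List String) (st2 : PySem.Set String × List (Option String)),
          PySem.Set.contains st2.1 x = true →
          PySem.Set.contains ((ns.foldl (fun st2 m => pvDfsA cset fc adj f m st2) st2)).1 x = true := by
        intro ns
        induction ns with
        | nil => intro st2 h2; exact h2
        | cons m ms ihm => intro st2 h2; exact ihm _ (ih m st2 x h2)
      exact hfold _ _ (pvContains_add_of _ _ _ h)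

theorem pvDfsA_mu_le (cset : PySem.Set (Option String)) (fc : List (String × Int))
    (adj : List (String × List String)) (f : Nat) (n : String)
    (st : PySem.Set String × List (Option String)) :
    pvMu cset (pvDfsA cset fc adj f n st).1 ≤ pvMu cset st.1 :=
  pvMu_anti cset st.1 _ (fun x hx => pvDfsA_mono cset fc adj f n st x hx)

theorem pvFoldA_mu_le (cset : PySem.Set (Option String)) (fc : List (String × Int))
    (adj : List (String × List String)) (f : Nat) (ns : List String) :
    ∀ (st : PySem.Set String × List (Option String)),
    pvMu cset ((ns.foldl (fun st2 n => pvDfsA cset fc adj f n st2) st)).1 ≤ pvMu cset st.1 := by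
  induction ns with
  | nil => intro st; exact le_refl _
  | cons m ms ih =>
    intro st
    simp only [List.foldl_cons]
    exact le_trans (ih _) (pvDfsA_mu_le cset fc adj f m st)

-- one-step equations for the intermediate loop
theorem pvLoopI_nil (cset : PySem.Set (Option String)) (fc : List (String × Int))
    (adj : List (String × List String)) (f : Nat)
    (st : PySem.Set String × List (Option String)) :
    pvLoopI cset fc adj f [] st = st := by
  rw [pvLoopI.eq_def]

theorem pvLoopI_skip (cset : PySem.Set (Option String)) (fc : List (String × Int))
    (adj : List (String × List String)) (f : Nat) (n : String) (stack : List String)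
    (st : PySem.Set String × List (Option String))
    (h : (PySem.Set.contains st.1 n || !PySem.Set.contains cset (some n)) = true) :
    pvLoopI cset fc adj f (n :: stack) st = pvLoopI cset fc adj f stack st := by
  rw [pvLoopI.eq_def]; simp only [h, if_true]

theorem pvLoopI_visit (cset : PySem.Set (Option String)) (fc : List (String × Int))
    (adj : List (String × List String)) (f : Nat) (n : String) (stack : List String)
    (st : PySem.Set String × List (Option String))
    (h : ¬ (PySem.Set.contains st.1 n || !PySem.Set.contains cset (some n)) = true) :
    pvLoopI cset fc adj (f + 1) (n :: stack) st
      = pvLoopI cset fc adj f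
          (pvNbrs cset fc adj (PySem.Set.add st.1 n) n ++ stack)
          (PySem.Set.add st.1 n, st.2 ++ [some n]) := by
  rw [pvLoopI.eq_def]; simp only [h]; simp

-- one-step equations for B's loop
theorem pvLoopB_nil (cset : PySem.Set (Option String)) (sadj : PySem.Dict String (List String))
    (f : Nat) (st : PySem.Set String × List (Option String)) :
    pvLoopB cset sadj f [] st = st := by
  rw [pvLoopB.eq_def]

theorem pvLoopB_skip (cset : PySem.Set (Option String)) (sadj : PySem.Dict String (List String))
    (f : Nat) (n : String) (stack : List String)
    (st : PySem.Set String × List (Option String))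
    (h : (PySem.Set.contains st.1 n || !PySem.Set.contains cset (some n)) = true) :
    pvLoopB cset sadj f (n :: stack) st = pvLoopB cset sadj f stack st := by
  rw [pvLoopB.eq_def]; simp only [h, if_true]

theorem pvLoopB_visit (cset : PySem.Set (Option String)) (sadj : PySem.Dict String (List String))
    (f : Nat) (n : String) (stack : List String)
    (st : PySem.Set String × List (Option String))
    (h : ¬ (PySem.Set.contains st.1 n || !PySem.Set.contains cset (some n)) = true) :
    pvLoopB cset sadj (f + 1) (n :: stack) st
      = pvLoopB cset sadj f (PySem.Dict.getD sadj n [] ++ stack)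
          (PySem.Set.add st.1 n, st.2 ++ [some n]) := by
  rw [pvLoopB.eq_def]; simp only [h]; simp

-- fuel-irrelevance for A's dfs and its neighbor fold, by strong induction on the μ bound
theorem pvFuelAux (cset : PySem.Set (Option String)) (fc : List (String × Int))
    (adj : List (String × List String)) :
    ∀ k : Nat,
    (∀ (f g : Nat) (n : String) (st : PySem.Set String × List (Option String)),
       pvMu cset st.1 ≤ k → pvMu cset st.1 ≤ f → pvMu cset st.1 ≤ g →
       pvDfsA cset fc adj f n st = pvDfsA cset fc adj g n st)
    ∧ (∀ (f g : Nat) (ns : List String) (st : PySem.Set String × List (Option String)),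
       pvMu cset st.1 ≤ k → pvMu cset st.1 ≤ f → pvMu cset st.1 ≤ g →
       ns.foldl (fun st2 n => pvDfsA cset fc adj f n st2) st
         = ns.foldl (fun st2 n => pvDfsA cset fc adj g n st2) st) := by
  intro k
  induction k using Nat.strong_induction_on with
  | _ k ih =>
    have hdfs : ∀ (f g : Nat) (n : String) (st : PySem.Set String × List (Option String)),
        pvMu cset st.1 ≤ k → pvMu cset st.1 ≤ f → pvMu cset st.1 ≤ g →
        pvDfsA cset fc adj f n st = pvDfsA cset fc adj g n st := by
      intro f g n st hk hf hg
      by_cases hc : (PySem.Set.contains st.1 n || !PySem.Set.contains cset (some n)) = true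
      · rw [pvDfsA_of_skip cset fc adj f n st hc, pvDfsA_of_skip cset fc adj g n st hc]
      · have hv : PySem.Set.contains st.1 n = false := by
          cases h' : PySem.Set.contains st.1 n with
          | false => rfl
          | true => exact absurd (by rw [h', Bool.true_or]) hc
        have hcs : PySem.Set.contains cset (some n) = true := by
          cases h' : PySem.Set.contains cset (some n) with
          | false => exact absurd (by rw [h', hv]; rfl) hc
          | true => rfl
        have h1 : 1 ≤ pvMu cset st.1 := pvMu_pos cset st.1 n hcs hv
        obtain ⟨f', rfl⟩ : ∃ f', f = f' + 1 := ⟨f - 1, by omega⟩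
        obtain ⟨g', rfl⟩ : ∃ g', g = g' + 1 := ⟨g - 1, by omega⟩
        rw [pvDfsA, pvDfsA, if_neg hc, if_neg hc]
        have hlt := pvMu_add_lt cset st.1 n hcs hv
        obtain ⟨k', rfl⟩ : ∃ k', k = k' + 1 := ⟨k - 1, by omega⟩
        exact (ih k' (by omega)).2 f' g' _ _
          (by show pvMu cset (PySem.Set.add st.1 n) ≤ k'; omega)
          (by show pvMu cset (PySem.Set.add st.1 n) ≤ f'; omega)
          (by show pvMu cset (PySem.Set.add st.1 n) ≤ g'; omega)
    refine ⟨hdfs, ?_⟩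
    intro f g ns
    induction ns with
    | nil => intro st _ _ _; rfl
    | cons m ms ihm =>
      intro st hk hf hg
      simp only [List.foldl_cons]
      rw [hdfs f g m st hk hf hg]
      exact ihm (pvDfsA cset fc adj g m st)
        (le_trans (pvDfsA_mu_le cset fc adj g m st) hk)
        (le_trans (pvDfsA_mu_le cset fc adj g m st) hf)
        (le_trans (pvDfsA_mu_le cset fc adj g m st) hg)


theorem pvLoopI_fuel (cset : PySem.Set (Option String)) (fc : List (String × Int))
    (adj : List (String × List String)) :
    ∀ (k : Nat) (stack : List String) (f g : Nat)
      (st : PySem.Set String × List (Option String)),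
    pvMu cset st.1 ≤ k → pvMu cset st.1 ≤ f → pvMu cset st.1 ≤ g →
    pvLoopI cset fc adj f stack st = pvLoopI cset fc adj g stack st := by
  intro k
  induction k using Nat.strong_induction_on with
  | _ k ih =>
    intro stack
    induction stack with
    | nil => intro f g st _ _ _; rw [pvLoopI_nil, pvLoopI_nil]
    | cons n rest ihs =>
      intro f g st hk hf hg
      by_cases hc : (PySem.Set.contains st.1 n || !PySem.Set.contains cset (some n)) = true
      · rw [pvLoopI_skip cset fc adj f n rest st hc, pvLoopI_skip cset fc adj g n rest st hc]
        exact ihs f g st hk hf hg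
      · have hv : PySem.Set.contains st.1 n = false := by
          cases h' : PySem.Set.contains st.1 n with
          | false => rfl
          | true => exact absurd (by rw [h', Bool.true_or]) hc
        have hcs : PySem.Set.contains cset (some n) = true := by
          cases h' : PySem.Set.contains cset (some n) with
          | false => exact absurd (by rw [h', hv]; rfl) hc
          | true => rfl
        have h1 : 1 ≤ pvMu cset st.1 := pvMu_pos cset st.1 n hcs hv
        obtain ⟨f', rfl⟩ : ∃ f', f = f' + 1 := ⟨f - 1, by omega⟩
        obtain ⟨g', rfl⟩ : ∃ g', g = g' + 1 := ⟨g - 1, by omega⟩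
        rw [pvLoopI_visit cset fc adj f' n rest st hc, pvLoopI_visit cset fc adj g' n rest st hc]
        have hlt := pvMu_add_lt cset st.1 n hcs hv
        obtain ⟨k', rfl⟩ : ∃ k', k = k' + 1 := ⟨k - 1, by omega⟩
        exact ih k' (by omega) _ f' g' _
          (by show pvMu cset (PySem.Set.add st.1 n) ≤ k'; omega)
          (by show pvMu cset (PySem.Set.add st.1 n) ≤ f'; omega)
          (by show pvMu cset (PySem.Set.add st.1 n) ≤ g'; omega)

-- the bridge: running the intermediate stack loop on ns ++ stack first performs A's dfs over ns
theorem pvBridge (cset : PySem.Set (Option String)) (fc : List (String × Int))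
    (adj : List (String × List String)) :
    ∀ (k : Nat) (ns stack : List String) (f : Nat)
      (st : PySem.Set String × List (Option String)),
    pvMu cset st.1 ≤ k → pvMu cset st.1 ≤ f →
    pvLoopI cset fc adj f (ns ++ stack) st
      = pvLoopI cset fc adj f stack (ns.foldl (fun st2 n => pvDfsA cset fc adj f n st2) st) := by
  intro k
  induction k using Nat.strong_induction_on with
  | _ k ih =>
    intro ns
    induction ns with
    | nil => intro stack f st _ _; rfl
    | cons n ns' ihn =>
      intro stack f st hk hf
      by_cases hc : (PySem.Set.contains st.1 n || !PySem.Set.contains cset (some n)) = true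
      · rw [List.cons_append, pvLoopI_skip cset fc adj f n (ns' ++ stack) st hc,
          ihn stack f st hk hf]
        congr 1
        simp only [List.foldl_cons]
        rw [pvDfsA_of_skip cset fc adj f n st hc]
      · have hv : PySem.Set.contains st.1 n = false := by
          cases h' : PySem.Set.contains st.1 n with
          | false => rfl
          | true => exact absurd (by rw [h', Bool.true_or]) hc
        have hcs : PySem.Set.contains cset (some n) = true := by
          cases h' : PySem.Set.contains cset (some n) with
          | false => exact absurd (by rw [h', hv]; rfl) hc
          | true => rfl
        have h1 : 1 ≤ pvMu cset st.1 := pvMu_pos cset st.1 n hcs hv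
        obtain ⟨f', rfl⟩ : ∃ f', f = f' + 1 := ⟨f - 1, by omega⟩
        obtain ⟨k', rfl⟩ : ∃ k', k = k' + 1 := ⟨k - 1, by omega⟩
        have hlt := pvMu_add_lt cset st.1 n hcs hv
        rw [List.cons_append, pvLoopI_visit cset fc adj f' n (ns' ++ stack) st hc]
        rw [ih k' (by omega) (pvNbrs cset fc adj (PySem.Set.add st.1 n) n) (ns' ++ stack) f'
          (PySem.Set.add st.1 n, st.2 ++ [some n])
          (by show pvMu cset (PySem.Set.add st.1 n) ≤ k'; omega)
          (by show pvMu cset (PySem.Set.add st.1 n) ≤ f'; omega)]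
        set st1 := (pvNbrs cset fc adj (PySem.Set.add st.1 n) n).foldl
          (fun st2 m => pvDfsA cset fc adj f' m st2)
          (PySem.Set.add st.1 n, st.2 ++ [some n]) with hst1
        have hmu1 : pvMu cset st1.1 ≤ pvMu cset (PySem.Set.add st.1 n) := by
          rw [hst1]; exact pvFoldA_mu_le cset fc adj f' _ _
        rw [ih k' (by omega) ns' stack f' st1 (by omega) (by omega)]
        set st2 := ns'.foldl (fun st3 m => pvDfsA cset fc adj f' m st3) st1 with hst2
        have hmu2 : pvMu cset st2.1 ≤ pvMu cset st1.1 := by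
          rw [hst2]; exact pvFoldA_mu_le cset fc adj f' _ _
        rw [pvLoopI_fuel cset fc adj (pvMu cset st2.1) stack f' (f' + 1) st2 (by omega)
          (by omega) (by omega)]
        congr 1
        simp only [List.foldl_cons]
        have hdfseq : pvDfsA cset fc adj (f' + 1) n st = st1 := by
          rw [pvDfsA, if_neg hc]
        rw [hdfseq, hst2]
        exact (pvFuelAux cset fc adj (pvMu cset st1.1)).2 f' (f' + 1) ns' st1 (le_refl _)
          (by omega) (by omega)


-- ---- stability of the (reverse) insertion sort under filter ----

theorem pvInsertBy_all (key : String → Int) (x : String) (l : List String)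
    (h : ∀ z ∈ l, key z < key x) :
    PySem.List.insertBy (fun a b => decide (key b < key a)) x l = x :: l := by
  cases l with
  | nil => rfl
  | cons y ys =>
    simp only [PySem.List.insertBy]
    rw [if_pos (by simpa using h y (List.mem_cons_self))]

theorem pvInsertBy_pairwise (key : String → Int) (x : String) :
    ∀ (l : List String), l.Pairwise (fun a b => key b ≤ key a) →
    (PySem.List.insertBy (fun a b => decide (key b < key a)) x l).Pairwise
      (fun a b => key b ≤ key a) := by
  intro l
  induction l with
  | nil => intro _; simp [PySem.List.insertBy]
  | cons y ys ih =>
    intro hp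
    rw [List.pairwise_cons] at hp
    simp only [PySem.List.insertBy]
    by_cases hyx : key y < key x
    · rw [if_pos (by simpa using hyx)]
      refine List.Pairwise.cons ?_ (List.Pairwise.cons hp.1 hp.2)
      intro z hz
      rcases List.mem_cons.mp hz with rfl | hz
      · omega
      · have := hp.1 z hz; omega
    · rw [if_neg (by simpa using hyx)]
      refine List.Pairwise.cons ?_ (ih hp.2)
      intro z hz
      rcases (PySem.List.mem_insertBy _ _ _ _).mp hz with rfl | hz
      · omega
      · exact hp.1 z hz

theorem pvInsertBy_filter (key : String → Int) (q : String → Bool) (x : String) :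
    ∀ (l : List String), l.Pairwise (fun a b => key b ≤ key a) →
    (PySem.List.insertBy (fun a b => decide (key b < key a)) x l).filter q
      = if q x then PySem.List.insertBy (fun a b => decide (key b < key a)) x (l.filter q)
        else l.filter q := by
  intro l
  induction l with
  | nil =>
    intro _
    by_cases hqx : q x = true <;> simp [PySem.List.insertBy, hqx]
  | cons y ys ih =>
    intro hp
    rw [List.pairwise_cons] at hp
    simp only [PySem.List.insertBy]
    by_cases hyx : key y < key x
    · rw [if_pos (by simpa using hyx)]
      by_cases hqx : q x = true
      · by_cases hqy : q y = true
        · simp [hqx, hqy, PySem.List.insertBy, hyx]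
        · rw [pvInsertBy_all key x ((y :: ys).filter q) (fun z hz => by
            rcases List.mem_filter.mp hz with ⟨hz1, hz2⟩
            rcases List.mem_cons.mp hz1 with rfl | hz1
            · rw [hz2] at hqy; exact absurd rfl hqy
            · exact lt_of_le_of_lt (hp.1 z hz1) hyx)]
          simp [hqx, hqy]
      · simp [List.filter_cons, hqx]
    · rw [if_neg (by simpa using hyx)]
      simp only [List.filter_cons]
      by_cases hqy : q y = true
      · simp only [hqy, if_true]
        rw [ih hp.2]
        by_cases hqx : q x = true
        · simp [hqx, PySem.List.insertBy, hyx]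
        · simp [hqx]
      · simp only [hqy, Bool.false_eq_true, if_false]
        rw [ih hp.2]

theorem pvSortFoldAux (key : String → Int) (q : String → Bool) :
    ∀ (xs acc : List String), acc.Pairwise (fun a b => key b ≤ key a) →
    (xs.foldl (fun acc x => PySem.List.insertBy (fun a b => decide (key b < key a)) x acc) acc).filter q
      = (xs.filter q).foldl
          (fun acc x => PySem.List.insertBy (fun a b => decide (key b < key a)) x acc)
          (acc.filter q) := by
  intro xs
  induction xs with
  | nil => intro acc _; rfl
  | cons x xs ih =>
    intro acc hp
    simp only [List.foldl_cons, List.filter_cons]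
    rw [ih _ (pvInsertBy_pairwise key x acc hp)]
    rw [pvInsertBy_filter key q x acc hp]
    by_cases hqx : q x = true
    · rw [if_pos hqx, if_pos hqx, List.foldl_cons]
    · rw [if_neg hqx, if_neg hqx]

-- a stable reverse-sort commutes with filter
theorem pvFilter_sorted_rev (key : String → Int) (q : String → Bool) (xs : List String) :
    (PySem.List.sorted xs key true).filter q = PySem.List.sorted (xs.filter q) key true := by
  rw [PySem.List.sorted_rev_eq_foldl_insertBy, PySem.List.sorted_rev_eq_foldl_insertBy]
  simpa using pvSortFoldAux key q xs [] List.Pairwise.nil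

-- ---- the precomputed dict vs per-visit recomputation ----

-- a dict built by mapping g over the values of an association list looks up to g of the lookup
theorem pvGetD_mk_map (g : List String → List String) (hg : g [] = []) :
    ∀ (l : List (String × List String)) (x : String),
    PySem.Dict.getD (PySem.Dict.mk (l.map (fun p => (p.1, g p.2)))) x []
      = g (PySem.Dict.getD (PySem.Dict.mk l) x []) := by
  intro l
  induction l with
  | nil => intro x; simp [PySem.Dict.getD, PySem.Dict.get?, hg]
  | cons p rest ih =>
    intro x
    simp only [List.map_cons]
    rw [PySem.Dict.getD_eq_get?_getD, PySem.Dict.getD_eq_get?_getD,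
      PySem.Dict.get?_mk_cons, PySem.Dict.get?_mk_cons]
    by_cases h : (p.1 == x) = true
    · rw [if_pos h, if_pos h]; rfl
    · rw [if_neg h, if_neg h, ← PySem.Dict.getD_eq_get?_getD, ← PySem.Dict.getD_eq_get?_getD]
      exact ih x

-- filtering the precomputed sorted neighbor list by the current visited set is
-- exactly A's per-visit neighbor computation
theorem pvSAdj_spec (cset : PySem.Set (Option String)) (fc : List (String × Int))
    (adj : List (String × List String)) (v : PySem.Set String) (n : String) :
    (PySem.Dict.getD (pvSAdj cset fc adj) n []).filter (fun m => !PySem.Set.contains v m)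
      = pvNbrs cset fc adj v n := by
  unfold pvSAdj pvNbrs
  rw [pvGetD_mk_map (fun ms =>
      PySem.List.sorted (ms.filter (fun m => PySem.Set.contains cset (some m)))
        (fun x => PySem.Dict.getD (PySem.Dict.mk fc) x 0) true) rfl adj n]
  rw [pvFilter_sorted_rev, List.filter_filter]
  congr 1
  apply List.filter_congr
  intro a _
  exact Bool.and_comm _ _

-- ---- deleting already-visited entries anywhere in the stack is invisible ----

inductive PvDel (v : PySem.Set String) : List String → List String → Prop
  | nil : PvDel v [] []
  | keep (n : String) {l l' : List String} : PvDel v l l' → PvDel v (n :: l) (n :: l')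
  | drop (n : String) {l l' : List String} :
      PySem.Set.contains v n = true → PvDel v l l' → PvDel v (n :: l) l'

theorem PvDel_refl (v : PySem.Set String) : ∀ l : List String, PvDel v l l := by
  intro l
  induction l with
  | nil => exact PvDel.nil
  | cons n l ih => exact PvDel.keep n ih

theorem PvDel_append (v : PySem.Set String) {l1 l1' l2 l2' : List String}
    (h1 : PvDel v l1 l1') (h2 : PvDel v l2 l2') : PvDel v (l1 ++ l2) (l1' ++ l2') := by
  induction h1 with
  | nil => exact h2
  | keep n _ ih => exact PvDel.keep n ih
  | drop n hn _ ih => exact PvDel.drop n hn ih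

theorem PvDel_mono {v w : PySem.Set String}
    (hvw : ∀ x, PySem.Set.contains v x = true → PySem.Set.contains w x = true)
    {l l' : List String} (h : PvDel v l l') : PvDel w l l' := by
  induction h with
  | nil => exact PvDel.nil
  | keep n _ ih => exact PvDel.keep n ih
  | drop n hn _ ih => exact PvDel.drop n (hvw n hn) ih

theorem PvDel_filter (v : PySem.Set String) (p : String → Bool) :
    ∀ l : List String, (∀ m ∈ l, p m = false → PySem.Set.contains v m = true) →
    PvDel v l (l.filter p) := by
  intro l
  induction l with
  | nil => intro _; exact PvDel.nil
  | cons n l ih =>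
    intro h
    rw [List.filter_cons]
    by_cases hn : p n = true
    · rw [if_pos hn]
      exact PvDel.keep n (ih (fun m hm => h m (List.mem_cons_of_mem n hm)))
    · rw [if_neg hn]
      exact PvDel.drop n (h n List.mem_cons_self (by simpa using hn))
        (ih (fun m hm => h m (List.mem_cons_of_mem n hm)))

theorem pvLoopB_del (cset : PySem.Set (Option String)) (sadj : PySem.Dict String (List String)) :
    ∀ (k f : Nat) (st : PySem.Set String × List (Option String)) (l l' : List String),
    PvDel st.1 l l' → pvMu cset st.1 ≤ k → pvMu cset st.1 ≤ f →
    pvLoopB cset sadj f l st = pvLoopB cset sadj f l' st := by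
  intro k
  induction k using Nat.strong_induction_on with
  | _ k ih =>
    intro f st l l' hdel hk hf
    induction hdel with
    | nil => rfl
    | keep n hsub ihd =>
      rename_i l l'
      by_cases hc : (PySem.Set.contains st.1 n || !PySem.Set.contains cset (some n)) = true
      · rw [pvLoopB_skip cset sadj f n l st hc, pvLoopB_skip cset sadj f n l' st hc]
        exact ihd
      · have hv : PySem.Set.contains st.1 n = false := by
          cases h' : PySem.Set.contains st.1 n with
          | false => rfl
          | true => exact absurd (by rw [h', Bool.true_or]) hc
        have hcs : PySem.Set.contains cset (some n) = true := by
          cases h' : PySem.Set.contains cset (some n) with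
          | false => exact absurd (by rw [h', hv]; rfl) hc
          | true => rfl
        have h1 : 1 ≤ pvMu cset st.1 := pvMu_pos cset st.1 n hcs hv
        obtain ⟨f', rfl⟩ : ∃ f', f = f' + 1 := ⟨f - 1, by omega⟩
        rw [pvLoopB_visit cset sadj f' n l st hc, pvLoopB_visit cset sadj f' n l' st hc]
        have hlt := pvMu_add_lt cset st.1 n hcs hv
        obtain ⟨k', rfl⟩ : ∃ k', k = k' + 1 := ⟨k - 1, by omega⟩
        apply ih k' (by omega) f' (PySem.Set.add st.1 n, st.2 ++ [some n])
        · exact PvDel_append _ (PvDel_refl _ _)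
            (PvDel_mono (fun x hx => pvContains_add_of st.1 n x hx) hsub)
        · show pvMu cset (PySem.Set.add st.1 n) ≤ k'; omega
        · show pvMu cset (PySem.Set.add st.1 n) ≤ f'; omega
    | drop n hn hsub ihd =>
      rw [pvLoopB_skip cset sadj f n _ st (by rw [hn, Bool.true_or])]
      exact ihd

-- ---- B's loop with the precomputed dict is the intermediate loop ----

theorem pvLoopBI (cset : PySem.Set (Option String)) (fc : List (String × Int))
    (adj : List (String × List String)) :
    ∀ (k : Nat) (stack : List String) (f : Nat)
      (st : PySem.Set String × List (Option String)),
    pvMu cset st.1 ≤ k → pvMu cset st.1 ≤ f →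
    pvLoopB cset (pvSAdj cset fc adj) f stack st = pvLoopI cset fc adj f stack st := by
  intro k
  induction k using Nat.strong_induction_on with
  | _ k ih =>
    intro stack
    induction stack with
    | nil => intro f st _ _; rw [pvLoopB_nil, pvLoopI_nil]
    | cons n rest ihs =>
      intro f st hk hf
      by_cases hc : (PySem.Set.contains st.1 n || !PySem.Set.contains cset (some n)) = true
      · rw [pvLoopB_skip cset _ f n rest st hc, pvLoopI_skip cset fc adj f n rest st hc]
        exact ihs f st hk hf
      · have hv : PySem.Set.contains st.1 n = false := by
          cases h' : PySem.Set.contains st.1 n with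
          | false => rfl
          | true => exact absurd (by rw [h', Bool.true_or]) hc
        have hcs : PySem.Set.contains cset (some n) = true := by
          cases h' : PySem.Set.contains cset (some n) with
          | false => exact absurd (by rw [h', hv]; rfl) hc
          | true => rfl
        have h1 : 1 ≤ pvMu cset st.1 := pvMu_pos cset st.1 n hcs hv
        obtain ⟨f', rfl⟩ : ∃ f', f = f' + 1 := ⟨f - 1, by omega⟩
        rw [pvLoopB_visit cset _ f' n rest st hc, pvLoopI_visit cset fc adj f' n rest st hc]
        have hlt := pvMu_add_lt cset st.1 n hcs hv
        obtain ⟨k', rfl⟩ : ∃ k', k = k' + 1 := ⟨k - 1, by omega⟩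
        have hmu1 : pvMu cset (PySem.Set.add st.1 n) ≤ k' := by omega
        have hmu2 : pvMu cset (PySem.Set.add st.1 n) ≤ f' := by omega
        have hdel : PvDel (PySem.Set.add st.1 n)
            (PySem.Dict.getD (pvSAdj cset fc adj) n [] ++ rest)
            (pvNbrs cset fc adj (PySem.Set.add st.1 n) n ++ rest) := by
          rw [← pvSAdj_spec cset fc adj (PySem.Set.add st.1 n) n]
          exact PvDel_append _
            (PvDel_filter _ _ _ (fun m _ hm => by revert hm; cases PySem.Set.contains (PySem.Set.add st.1 n) m <;> simp))
            (PvDel_refl _ _)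
        rw [pvLoopB_del cset (pvSAdj cset fc adj) k' f'
          (PySem.Set.add st.1 n, st.2 ++ [some n]) _ _ hdel hmu1 hmu2]
        exact ih k' (by omega) _ f' _ hmu1 hmu2

-- ===== VERDICT (by name: the statement is the Claim_ definition above) =====
theorem get_dfs_country_order_spec : Claim_equal_get_dfs_country_order := by
  unfold Claim_equal_get_dfs_country_order
  intro cwf fc adj _
  unfold Spec_get_dfs_country_order get_dfs_country_order get_dfs_country_order_alt
  dsimp only
  have hmu0 : pvMu (PySem.Set.ofList cwf) (PySem.Set.empty : PySem.Set String) ≤ cwf.length :=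
    le_trans (pvMu_le _ _) (PySem.Set.length_ofList_le cwf)
  rw [pvLoopBI (PySem.Set.ofList cwf) fc adj cwf.length
    (PySem.List.sorted (cwf.filterMap (fun c => c))
      (fun x => PySem.Dict.getD (PySem.Dict.mk fc) x 0) true)
    cwf.length (PySem.Set.empty, []) hmu0 hmu0]
  have hbridge := pvBridge (PySem.Set.ofList cwf) fc adj cwf.length
      (pvStarts cwf fc) [] cwf.length (PySem.Set.empty, ([] : List (Option String))) hmu0 hmu0
  rw [List.append_nil] at hbridge
  rw [pvLoopI_nil] at hbridge
  unfold pvStarts at hbridge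
  rw [hbridge]
  congr 2
  have hfun : (fun (st : PySem.Set String × List (Option String)) c =>
        if PySem.Set.contains st.1 c = true then st
        else pvDfsA (PySem.Set.ofList cwf) fc adj cwf.length c st)
      = (fun (st : PySem.Set String × List (Option String)) c =>
        pvDfsA (PySem.Set.ofList cwf) fc adj cwf.length c st) := by
    funext st c
    by_cases h : PySem.Set.contains st.1 c = true
    · rw [if_pos h, pvDfsA_of_contains _ _ _ _ _ _ h]
    · rw [if_neg h]
  rw [pvStarts, hfun]
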